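-- pv_equiv track=rewrite | github.com/wdi2020/wdi_python | cwiczenia2020/Cwiczenia 6/cw31.py | reku
-- ===== SOURCE A (Python) =====
-- def reku(tab,idx,num):
--     if len(tab) == idx:
--         if num != 1:
--             return num
--         return 0
--     suma = 0
--     suma += reku(tab,idx+1,num)
--     num*= tab[idx]
--     suma+= reku(tab,idx+1,num)
--     return suma
-- ===== SOURCE B (Python) =====
-- def reku(tab, idx, num):
--     # Iteratively build the products of num with every subset of tab[idx:],
--     # then sum those that are not equal to 1.
--     products = [num]
--     for x in tab[idx:]:
--         products = products + [p * x for p in products]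
--     return sum(p for p in products if p != 1)
-- ===== Notes on version B (the rewrite author's own statement) =====
-- stated objective: alternative
-- what changed: Replaces the two-branch recursion over an index with an iterative construction of the list of all 2^n subset products followed by one filtered sum.
-- outside the precondition, e.g. on reku([2, 3], -1, 5): A returns 240, B returns 20; on reku([2, 3], 3, 5): A raises RecursionError, B returns 5
import Mathlib
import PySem

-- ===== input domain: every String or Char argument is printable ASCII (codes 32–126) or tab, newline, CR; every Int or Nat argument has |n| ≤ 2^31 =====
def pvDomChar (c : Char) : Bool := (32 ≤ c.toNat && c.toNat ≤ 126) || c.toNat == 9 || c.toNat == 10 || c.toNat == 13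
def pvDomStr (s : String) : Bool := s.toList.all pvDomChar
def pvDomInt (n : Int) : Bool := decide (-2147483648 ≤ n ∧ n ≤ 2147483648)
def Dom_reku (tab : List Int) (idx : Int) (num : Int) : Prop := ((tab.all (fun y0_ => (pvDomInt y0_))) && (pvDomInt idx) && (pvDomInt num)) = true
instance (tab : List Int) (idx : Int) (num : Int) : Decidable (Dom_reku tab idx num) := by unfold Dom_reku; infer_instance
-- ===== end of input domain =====

-- B builds the list of all subset products iteratively and sums the ones ≠ 1,
-- instead of A's two-branch recursion; equivalence is proved on 0 ≤ idx ≤ len(tab).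


-- ===== PORT A =====
def reku (tab : List Int) (idx : Int) (num : Int) : Int :=
  if (tab.length : Int) = idx then
    if num ≠ 1 then num else 0
  else
    match h : PySem.List.pyGet? tab idx with
    | none => 0   -- Python raises here (idx out of range / endless recursion); excluded by Pre_reku
    | some x => reku tab (idx + 1) num + reku tab (idx + 1) (num * x)
termination_by ((tab.length : Int) - idx).toNat
decreasing_by
  all_goals
    have hr : PySem.Raise.InRange tab.length idx := by
      by_contra hc
      rw [← PySem.List.pyGet?_eq_none_iff] at hc
      simp [hc] at h
    unfold PySem.Raise.InRange at hr
    omega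

-- ===== PORT B =====
def reku_alt (tab : List Int) (idx : Int) (num : Int) : Int :=
  let products :=
    (PySem.List.slice tab (some idx) none).foldl
      (fun ps x => ps ++ ps.map (fun p => p * x)) [num]
  (products.filter (fun p => p != 1)).sum

-- ===== PRECONDITION & SPEC =====
-- idx is A's recursion cursor: Pre_ restricts to its natural domain 0 ≤ idx ≤ len(tab);
-- for idx > len(tab) A recurses forever (RecursionError), and for negative idx A's
-- negative-index wraparound processes tab[idx:] and then the whole list again — an
-- artefact of A's implementation that B (which iterates over tab[idx:]) does not mimic.
def Pre_reku (tab : List Int) (idx : Int) (num : Int) : Prop :=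
  0 ≤ idx ∧ idx ≤ tab.length
instance (tab : List Int) (idx : Int) (num : Int) : Decidable (Pre_reku tab idx num) := by
  unfold Pre_reku; infer_instance

def pvWitness_reku : List Int × Int × Int := ([2, 3, -1], 0, 5)

def Spec_reku (tab : List Int) (idx : Int) (num : Int) (out : Int) : Prop := out = reku_alt tab idx num
instance (tab : List Int) (idx : Int) (num : Int) (out : Int) : Decidable (Spec_reku tab idx num out) := by unfold Spec_reku; infer_instance

-- ===== CLAIM (what is proved, stated in full; the proofs are below) =====
def Claim_equal_reku : Prop := ∀ (tab : List Int) (idx : Int) (num : Int), Dom_reku tab idx num → Pre_reku tab idx num → Spec_reku tab idx num (reku tab idx num)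

-- ===== LEMMAS AND PROOFS =====

-- A's recursion, phrased structurally on the suffix of tab it still has to visit.
def rekuF : List Int → Int → Int
  | [], num => if num ≠ 1 then num else 0
  | x :: l, num => rekuF l num + rekuF l (num * x)

theorem filter_ne_one_sum (ps : List Int) :
    (ps.filter (fun p => p != 1)).sum = (ps.map (fun p => if p ≠ 1 then p else 0)).sum := by
  induction ps with
  | nil => rfl
  | cons p ps ih =>
    by_cases hp : p = 1 <;> simp [hp, ih]

theorem build_sum (l : List Int) : ∀ ps : List Int,
    ((l.foldl (fun ps x => ps ++ ps.map (fun p => p * x)) ps).filter (fun p => p != 1)).sum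
      = (ps.map (rekuF l)).sum := by
  induction l with
  | nil =>
    intro ps
    simpa [rekuF] using filter_ne_one_sum ps
  | cons x l ih =>
    intro ps
    simp only [List.foldl_cons, ih, List.map_append, List.map_map, List.sum_append, rekuF]
    rw [← List.sum_map_add]
    rfl

theorem reku_eq_rekuF (tab : List Int) : ∀ (n : ℕ) (idx num : Int), 0 ≤ idx → idx ≤ tab.length →
    ((tab.length : Int) - idx).toNat = n → reku tab idx num = rekuF (tab.drop idx.toNat) num := by
  intro n
  induction n with
  | zero =>
    intro idx num h0 hlen hn
    have hidx : (tab.length : Int) = idx := by omega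
    rw [reku, if_pos hidx]
    have : tab.length ≤ idx.toNat := by omega
    rw [List.drop_eq_nil_of_le this]
    rfl
  | succ n ih =>
    intro idx num h0 hlen hn
    have hlt : idx < (tab.length : Int) := by omega
    have hne : ¬ ((tab.length : Int) = idx) := by omega
    have hget : PySem.List.pyGet? tab idx = some tab[idx.toNat] :=
      PySem.List.pyGet?_eq_some_getElem tab h0 hlt
    rw [reku, if_neg hne]
    have hdrop : tab.drop idx.toNat = tab[idx.toNat] :: tab.drop (idx.toNat + 1) := by
      exact List.drop_eq_getElem_cons (by omega)
    have h1 : (idx + 1).toNat = idx.toNat + 1 := by omega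
    rw [hdrop]
    rw [hget]
    dsimp only
    rw [ih (idx + 1) num (by omega) (by omega) (by omega),
        ih (idx + 1) (num * tab[idx.toNat]) (by omega) (by omega) (by omega), h1]
    rfl

theorem reku_alt_eq_rekuF (tab : List Int) (idx num : Int) (h0 : 0 ≤ idx) :
    reku_alt tab idx num = rekuF (tab.drop idx.toNat) num := by
  unfold reku_alt
  rw [PySem.List.slice_from tab h0, build_sum]
  simp

-- ===== VERDICT (by name: the statement is the Claim_ definition above) =====
theorem reku_spec : Claim_equal_reku := by
  intro tab idx num _ hpre
  obtain ⟨h0, hlen⟩ := hpre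
  unfold Spec_reku
  rw [reku_eq_rekuF tab (((tab.length : Int) - idx).toNat) idx num h0 hlen rfl,
      reku_alt_eq_rekuF tab idx num h0]
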